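-- pv_equiv track=rewrite | github.com/n0thingNoob/CGRA-log-analyzer | timeseries_comparison.py | longest_window
-- ===== SOURCE A (Python) =====
-- def longest_window(active_counts, min_active):
--     """Return (start, end) of longest contiguous window with active_count >= min_active."""
--     if not active_counts:
--         return None
--
--     min_cycle = min(active_counts)
--     max_cycle = max(active_counts)
--     best = None
--     cur_start = None
--     prev_cycle = min_cycle - 1
--
--     for cycle in range(min_cycle, max_cycle + 1):
--         count = active_counts.get(cycle, 0)
--         if count >= min_active:
--             if cur_start is None:
--                 cur_start = cycle
--             elif prev_cycle is not None and cycle != prev_cycle + 1: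
--                 cur_end = prev_cycle
--                 if best is None or (cur_end - cur_start) > (best[1] - best[0]):
--                     best = (cur_start, cur_end)
--                 cur_start = cycle
--         else:
--             if cur_start is not None and prev_cycle is not None:
--                 cur_end = prev_cycle
--                 if best is None or (cur_end - cur_start) > (best[1] - best[0]):
--                     best = (cur_start, cur_end)
--             cur_start = None
--         prev_cycle = cycle
--
--     if cur_start is not None and prev_cycle is not None:
--         cur_end = prev_cycle
--         if best is None or (cur_end - cur_start) > (best[1] - best[0]):
--             best = (cur_start, cur_end)
--
--     return best
-- ===== SOURCE B (Python) =====
-- def _better(best, run):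
--     if run is None:
--         return best
--     if best is None or run[1] - run[0] > best[1] - best[0]:
--         return (run[0], run[1])
--     return best
--
--
-- def longest_window(active_counts, min_active):
--     """Return (start, end) of longest contiguous window with active_count >= min_active."""
--     if not active_counts:
--         return None
--     if min_active > 0:
--         # only recorded cycles can qualify: longest consecutive run of sorted qualifying keys
--         best = None
--         run = None  # (start, prev) of the current consecutive run
--         for c in sorted(c for c in active_counts if active_counts[c] >= min_active):
--             if run is not None and c == run[1] + 1:
--                 run = (run[0], c)
--             else:
--                 best = _better(best, run)
--                 run = (c, c)
--         return _better(best, run)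
--     else:
--         # unrecorded cycles have count 0 >= min_active: qualifying cycles are the whole
--         # span minus the recorded cycles that fall below the threshold
--         lo, hi = min(active_counts), max(active_counts)
--         best = None
--         s = lo
--         for b in sorted(c for c in active_counts if active_counts[c] < min_active):
--             if s <= b - 1:
--                 best = _better(best, (s, b - 1))
--             s = b + 1
--         if s <= hi:
--             best = _better(best, (s, hi))
--         return best
-- ===== Notes on version B (the rewrite author's own statement) =====
-- stated objective: faster
-- what changed: A scans every integer cycle in [min(keys), max(keys)] doing a dict lookup per cycle; B sorts only the relevant keys (qualifying keys when min_active > 0, below-threshold keys otherwise, since absent cycles count as 0) and finds the longest consecutive run / widest gap, so the cycle range is never enumerated.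
import Mathlib
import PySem

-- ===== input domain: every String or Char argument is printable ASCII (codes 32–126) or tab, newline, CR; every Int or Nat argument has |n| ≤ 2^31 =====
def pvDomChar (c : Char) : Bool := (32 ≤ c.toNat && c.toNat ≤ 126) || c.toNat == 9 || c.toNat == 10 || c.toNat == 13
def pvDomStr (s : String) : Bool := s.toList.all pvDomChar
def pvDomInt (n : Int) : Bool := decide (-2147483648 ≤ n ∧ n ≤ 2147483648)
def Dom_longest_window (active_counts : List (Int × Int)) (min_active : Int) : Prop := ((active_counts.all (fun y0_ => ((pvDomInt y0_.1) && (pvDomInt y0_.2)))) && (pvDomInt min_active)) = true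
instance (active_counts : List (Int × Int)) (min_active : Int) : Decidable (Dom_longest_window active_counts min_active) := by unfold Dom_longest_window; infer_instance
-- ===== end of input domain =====

-- B replaces A's scan of every cycle in [min(keys), max(keys)] by a scan of the sorted
-- relevant keys only (qualifying keys for min_active > 0, below-threshold keys otherwise):
-- O(k log k) in the number of keys instead of O(max-min). Same return value everywhere.

-- ===== PORT A =====
-- inline 'if best is None or (cur_end - cur_start) > (best[1] - best[0]): best = (cur_start, cur_end)'
def pvBestUpd (best : Option (Int × Int)) (cs ce : Int) : Option (Int × Int) :=
  match best with
  | none => some (cs, ce)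
  | some b => if ce - cs > b.2 - b.1 then some (cs, ce) else some b

-- one iteration of A's 'for cycle in range(min_cycle, max_cycle + 1)' loop;
-- state = (best, cur_start, prev_cycle)  (prev_cycle is an int from its initialisation on)
def pvAStep (d : PySem.Dict Int Int) (min_active : Int)
    (st : Option (Int × Int) × Option Int × Int) (cycle : Int) :
    Option (Int × Int) × Option Int × Int :=
  let count := PySem.Dict.getD d cycle 0
  if count ≥ min_active then
    match st.2.1 with
    | none => (st.1, some cycle, cycle)
    | some cs =>
      if cycle ≠ st.2.2 + 1 then (pvBestUpd st.1 cs st.2.2, some cycle, cycle)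
      else (st.1, some cs, cycle)
  else
    match st.2.1 with
    | some cs => (pvBestUpd st.1 cs st.2.2, none, cycle)
    | none => (st.1, none, cycle)

def longest_window (active_counts : List (Int × Int)) (min_active : Int) : Option (Int × Int) :=
  if active_counts = [] then none
  else
    let d := PySem.Dict.mk active_counts
    match PySem.List.min? d.keys (fun k => k), PySem.List.max? d.keys (fun k => k) with
    | some min_cycle, some max_cycle =>
      let st := (PySem.List.pyRange min_cycle (max_cycle + 1)).foldl
        (pvAStep d min_active) (none, none, min_cycle - 1)
      match st.2.1 with
      | some cs => pvBestUpd st.1 cs st.2.2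
      | none => st.1
    | _, _ => none

-- ===== PORT B =====
-- helper _better(best, run) of Source B
def pvBetter (best : Option (Int × Int)) (run : Option (Int × Int)) : Option (Int × Int) :=
  match run with
  | none => best
  | some r =>
    match best with
    | none => some (r.1, r.2)
    | some b => if r.2 - r.1 > b.2 - b.1 then some (r.1, r.2) else some b

-- one iteration of Source B's run-tracking loop over the sorted qualifying keys
def pvRunStep (st : Option (Int × Int) × Option (Int × Int)) (c : Int) :
    Option (Int × Int) × Option (Int × Int) :=
  match st.2 with
  | some r => if c = r.2 + 1 then (st.1, some (r.1, c)) else (pvBetter st.1 (some r), some (c, c))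
  | none => (st.1, some (c, c))

-- one iteration of Source B's gap loop over the sorted below-threshold keys; state = (best, s)
def pvGapStep (st : Option (Int × Int) × Int) (b : Int) : Option (Int × Int) × Int :=
  (if st.2 ≤ b - 1 then pvBetter st.1 (some (st.2, b - 1)) else st.1, b + 1)

-- 'for c in active_counts' iterates the dict's (distinct) keys: PySem.List.dedup d.keys;
-- 'active_counts[c]' with c a key is ported as PySem.Dict.getD d c 0 (c is present, so equal)
def longest_window_alt (active_counts : List (Int × Int)) (min_active : Int) : Option (Int × Int) :=
  if active_counts = [] then none
  else
    let d := PySem.Dict.mk active_counts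
    if min_active > 0 then
      let qual := PySem.List.sorted
        ((PySem.List.dedup d.keys).filter (fun c => PySem.Dict.getD d c 0 ≥ min_active)) (fun x => x)
      let st := qual.foldl pvRunStep (none, none)
      pvBetter st.1 st.2
    else
      match PySem.List.min? d.keys (fun k => k) with
      | none => none
      | some lo =>
        match PySem.List.max? d.keys (fun k => k) with
        | none => none
        | some hi =>
          let bad := PySem.List.sorted
            ((PySem.List.dedup d.keys).filter (fun c => PySem.Dict.getD d c 0 < min_active)) (fun x => x)
          let st := bad.foldl pvGapStep (none, lo)
          if st.2 ≤ hi then pvBetter st.1 (some (st.2, hi)) else st.1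

-- ===== PRECONDITION & SPEC =====
def Spec_longest_window (active_counts : List (Int × Int)) (min_active : Int) (out : Option (Int × Int)) : Prop := out = longest_window_alt active_counts min_active
instance (active_counts : List (Int × Int)) (min_active : Int) (out : Option (Int × Int)) : Decidable (Spec_longest_window active_counts min_active out) := by unfold Spec_longest_window; infer_instance

-- ===== CLAIM (what is proved, stated in full; the proofs are below) =====
def Claim_equal_longest_window : Prop := ∀ (active_counts : List (Int × Int)) (min_active : Int), Dom_longest_window active_counts min_active → Spec_longest_window active_counts min_active (longest_window active_counts min_active)

-- ===== LEMMAS AND PROOFS =====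

-- the qualifying test of A's loop body, as a predicate on cycles
def pvQ (d : PySem.Dict Int Int) (ma : Int) (c : Int) : Bool := decide (PySem.Dict.getD d c 0 ≥ ma)

-- A's loop state, Source B's run-machine state, Source B's gap-machine state after the first n cycles
def pvSA (d : PySem.Dict Int Int) (ma mn : Int) (n : Nat) : Option (Int × Int) × Option Int × Int :=
  (PySem.List.pyRange mn (mn + n)).foldl (pvAStep d ma) (none, none, mn - 1)
def pvSB (d : PySem.Dict Int Int) (ma mn : Int) (n : Nat) : Option (Int × Int) × Option (Int × Int) :=
  ((PySem.List.pyRange mn (mn + n)).filter (pvQ d ma)).foldl pvRunStep (none, none)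
def pvSG (d : PySem.Dict Int Int) (ma mn : Int) (n : Nat) : Option (Int × Int) × Int :=
  ((PySem.List.pyRange mn (mn + n)).filter (fun c => !pvQ d ma c)).foldl pvGapStep (none, mn)


theorem pvRange_succ (mn : Int) (n : Nat) :
    PySem.List.pyRange mn (mn + (n + 1 : Nat)) = PySem.List.pyRange mn (mn + n) ++ [mn + n] := by
  have h1 : (mn + (((n : Nat) + 1 : Nat) : Int)) = (mn + (n : Nat)) + 1 := by push_cast; ring
  rw [h1, PySem.List.pyRange_one_succ_right (by omega)]

theorem pvSA_succ (d : PySem.Dict Int Int) (ma mn : Int) (n : Nat) :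
    pvSA d ma mn (n + 1) = pvAStep d ma (pvSA d ma mn n) (mn + n) := by
  unfold pvSA
  rw [pvRange_succ, List.foldl_append]
  rfl

theorem pvSB_succ (d : PySem.Dict Int Int) (ma mn : Int) (n : Nat) :
    pvSB d ma mn (n + 1) =
      (if pvQ d ma (mn + n) then pvRunStep (pvSB d ma mn n) (mn + n) else pvSB d ma mn n) := by
  unfold pvSB
  rw [pvRange_succ, List.filter_append]
  by_cases hq : pvQ d ma (mn + n) = true <;> simp [hq]

theorem pvSG_succ (d : PySem.Dict Int Int) (ma mn : Int) (n : Nat) :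
    pvSG d ma mn (n + 1) =
      (if pvQ d ma (mn + n) then pvSG d ma mn n else pvGapStep (pvSG d ma mn n) (mn + n)) := by
  unfold pvSG
  rw [pvRange_succ, List.filter_append]
  by_cases hq : pvQ d ma (mn + n) = true <;> simp [hq]

theorem pvBestUpd_eq_better (best : Option (Int × Int)) (cs ce : Int) :
    pvBestUpd best cs ce = pvBetter best (some (cs, ce)) := by
  cases best <;> rfl

theorem pvGetD_of_not_mem (l : List (Int × Int)) (c : Int) (h : c ∉ l.map Prod.fst) :
    PySem.Dict.getD (PySem.Dict.mk l) c 0 = 0 := by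
  have hf : List.find? (fun p => p.1 == c) l = none := by
    rw [List.find?_eq_none]
    intro p hp hbeq
    exact h (List.mem_map.mpr ⟨p, hp, by simpa using hbeq⟩)
  simp [PySem.Dict.getD, PySem.Dict.get?, hf]

-- A's range scan simulated by Source B's run machine over the qualifying cycles
theorem pvSim1 (d : PySem.Dict Int Int) (ma mn : Int) (n : Nat) :
    (pvSA d ma mn n).2.2 = mn - 1 + n ∧
      (((pvSA d ma mn n).2.1 = none ∧
          (pvSA d ma mn n).1 = pvBetter (pvSB d ma mn n).1 (pvSB d ma mn n).2 ∧
          (∀ r, (pvSB d ma mn n).2 = some r → r.2 < mn - 1 + n)) ∨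
       (∃ s, (pvSA d ma mn n).2.1 = some s ∧ (pvSA d ma mn n).1 = (pvSB d ma mn n).1 ∧
          (pvSB d ma mn n).2 = some (s, mn - 1 + n))) := by
  induction n with
  | zero =>
    refine ⟨by simp [pvSA], Or.inl ⟨by simp [pvSA], ?_, ?_⟩⟩
    · simp [pvSA, pvSB, pvBetter]
    · intro r hr
      simp [pvSB] at hr
  | succ n ih =>
    rw [pvSA_succ, pvSB_succ]
    rcases hsa : pvSA d ma mn n with ⟨ba, ca, pa⟩
    rcases hsb : pvSB d ma mn n with ⟨bb, rb⟩
    rw [hsa, hsb] at ih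
    obtain ⟨hprev, hcase⟩ := ih
    simp only at hprev hcase
    subst hprev
    have hcast : mn - 1 + ((n : Nat) + 1 : Nat) = (mn - 1 + n) + 1 := by push_cast; ring
    rw [hcast]
    by_cases hq : pvQ d ma (mn + n) = true
    · have hge : PySem.Dict.getD d (mn + n) 0 ≥ ma := by simpa [pvQ] using hq
      rw [if_pos hq]
      rcases hcase with ⟨h1, h2, h3⟩ | ⟨s, h1, h2, h3⟩
      · -- A: cur_start is None, cycle qualifies: a new run opens; B steps likewise
        subst h1 h2
        refine ⟨by simp [pvAStep, hge]; omega, Or.inr ⟨mn + n, ?_, ?_, ?_⟩⟩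
        · simp [pvAStep, hge]
        · cases hb : rb with
          | none => subst hb; simp [pvAStep, pvRunStep, hge, pvBetter]
          | some r =>
            subst hb
            have hne : ¬ (mn + (n : Nat)) = r.2 + 1 := by have := h3 r rfl; omega
            simp [pvAStep, pvRunStep, hge, hne]
        · cases hb : rb with
          | none => subst hb; simp [pvRunStep]; omega
          | some r =>
            subst hb
            have hne : ¬ (mn + (n : Nat)) = r.2 + 1 := by have := h3 r rfl; omega
            simp [pvRunStep, hne]; omega
      · -- A: run continues (the 'cycle != prev_cycle + 1' branch is dead: cycle = prev + 1)
        subst h1 h2 h3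
        have heq : (mn + (n : Nat)) = (mn - 1 + n) + 1 := by omega
        have hge' : ma ≤ PySem.Dict.getD d ((mn - 1 + n) + 1) 0 := by rw [← heq]; exact hge
        have hrun : (mn + (n : Nat)) = (s, mn - 1 + (n : Nat)).2 + 1 := by simp; omega
        refine ⟨?_, Or.inr ⟨s, ?_, ?_, ?_⟩⟩
        · simp [pvAStep, heq, hge']
        · simp [pvAStep, heq, hge']
        · simp [pvAStep, pvRunStep, heq, hge']
        · simp [pvRunStep, hrun]
    · have hlt : ¬ (PySem.Dict.getD d (mn + n) 0 ≥ ma) := by simpa [pvQ] using hq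
      rw [if_neg hq]
      rcases hcase with ⟨h1, h2, h3⟩ | ⟨s, h1, h2, h3⟩
      · subst h1 h2
        refine ⟨by simp [pvAStep, hlt]; omega, Or.inl ⟨by simp [pvAStep, hlt], ?_, ?_⟩⟩
        · simp [pvAStep, hlt]
        · intro r hr
          have := h3 r hr
          omega
      · subst h1 h2 h3
        refine ⟨by simp [pvAStep, hlt]; omega, Or.inl ⟨by simp [pvAStep, hlt], ?_, ?_⟩⟩
        · simp [pvAStep, hlt, pvBestUpd_eq_better]
        · intro r hr
          simp only [Option.some.injEq] at hr
          subst hr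
          simp only
          omega

-- A's range scan simulated by Source B's gap machine over the non-qualifying cycles
theorem pvSim2 (d : PySem.Dict Int Int) (ma mn : Int) (n : Nat) :
    (pvSA d ma mn n).2.2 = mn - 1 + n ∧
      (((pvSA d ma mn n).2.1 = none ∧ (pvSA d ma mn n).1 = (pvSG d ma mn n).1 ∧
          (pvSG d ma mn n).2 = mn + n) ∨
       (∃ s, (pvSA d ma mn n).2.1 = some s ∧ (pvSA d ma mn n).1 = (pvSG d ma mn n).1 ∧
          (pvSG d ma mn n).2 = s ∧ s ≤ mn - 1 + n)) := by
  induction n with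
  | zero =>
    refine ⟨by simp [pvSA], Or.inl ⟨by simp [pvSA], ?_, ?_⟩⟩
    · simp [pvSA, pvSG]
    · simp [pvSG]
  | succ n ih =>
    rw [pvSA_succ, pvSG_succ]
    rcases hsa : pvSA d ma mn n with ⟨ba, ca, pa⟩
    rcases hsg : pvSG d ma mn n with ⟨bg, sg⟩
    rw [hsa, hsg] at ih
    obtain ⟨hprev, hcase⟩ := ih
    simp only at hprev hcase
    subst hprev
    have hcast : mn - 1 + ((n : Nat) + 1 : Nat) = (mn - 1 + n) + 1 := by push_cast; ring
    rw [hcast]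
    by_cases hq : pvQ d ma (mn + n) = true
    · have hge : PySem.Dict.getD d (mn + n) 0 ≥ ma := by simpa [pvQ] using hq
      rw [if_pos hq]
      rcases hcase with ⟨h1, h2, h3⟩ | ⟨s, h1, h2, h3, h4⟩
      · subst h1 h2 h3
        refine ⟨by simp [pvAStep, hge]; omega, Or.inr ⟨mn + n, ?_, ?_, rfl, by omega⟩⟩
        · simp [pvAStep, hge]
        · simp [pvAStep, hge]
      · subst h1 h2 h3
        have heq : (mn + (n : Nat)) = (mn - 1 + n) + 1 := by omega
        have hge' : ma ≤ PySem.Dict.getD d ((mn - 1 + n) + 1) 0 := by rw [← heq]; exact hge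
        refine ⟨by simp [pvAStep, heq, hge'], Or.inr ⟨sg, ?_, ?_, rfl, by omega⟩⟩
        · simp [pvAStep, heq, hge']
        · simp [pvAStep, heq, hge']
    · have hlt : ¬ (PySem.Dict.getD d (mn + n) 0 ≥ ma) := by simpa [pvQ] using hq
      rw [if_neg hq]
      rcases hcase with ⟨h1, h2, h3⟩ | ⟨s, h1, h2, h3, h4⟩
      · subst h1 h2 h3
        refine ⟨by simp [pvAStep, hlt]; omega, Or.inl ⟨by simp [pvAStep, hlt], ?_, ?_⟩⟩
        · have hno : ¬ ((mn + (n : Nat)) ≤ (mn + (n : Nat)) - 1) := by omega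
          simp [pvAStep, pvGapStep, hlt, hno]
        · simp [pvGapStep]; omega
      · subst h1 h2 h3
        refine ⟨by simp [pvAStep, hlt]; omega, Or.inl ⟨by simp [pvAStep, hlt], ?_, ?_⟩⟩
        · have hmid : (mn + (n : Nat)) - 1 = mn - 1 + (n : Nat) := by omega
          simp [pvAStep, pvGapStep, hlt, hmid, h4, pvBestUpd_eq_better]
        · simp [pvGapStep]; omega

-- A's final flush equals Source B's final _better call (min_active > 0 shape)
theorem pvFinal1 (d : PySem.Dict Int Int) (ma mn : Int) (N : Nat) :
    (match (pvSA d ma mn N).2.1 with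
     | some cs => pvBestUpd (pvSA d ma mn N).1 cs (pvSA d ma mn N).2.2
     | none => (pvSA d ma mn N).1) =
      pvBetter (pvSB d ma mn N).1 (pvSB d ma mn N).2 := by
  obtain ⟨hprev, hcase⟩ := pvSim1 d ma mn N
  rcases hcase with ⟨h1, h2, _⟩ | ⟨s, h1, h2, h3⟩
  · rw [h1, h2]
  · rw [h1, h2, h3, hprev]
    simp [pvBestUpd_eq_better]

-- A's final flush equals Source B's final gap flush (min_active <= 0 shape)
theorem pvFinal2 (d : PySem.Dict Int Int) (ma mn : Int) (N : Nat) :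
    (match (pvSA d ma mn N).2.1 with
     | some cs => pvBestUpd (pvSA d ma mn N).1 cs (pvSA d ma mn N).2.2
     | none => (pvSA d ma mn N).1) =
      (if (pvSG d ma mn N).2 ≤ mn - 1 + N then
        pvBetter (pvSG d ma mn N).1 (some ((pvSG d ma mn N).2, mn - 1 + N))
       else (pvSG d ma mn N).1) := by
  obtain ⟨hprev, hcase⟩ := pvSim2 d ma mn N
  rcases hcase with ⟨h1, h2, h3⟩ | ⟨s, h1, h2, h3, h4⟩
  · rw [h1, h2, h3, if_neg (by omega)]
  · rw [h1, h2, h3, hprev, if_pos h4]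
    simp [pvBestUpd_eq_better]

-- the same two statements with the range bound as it appears in the ports
theorem pvFinal1' (d : PySem.Dict Int Int) (ma mn b : Int) (N : Nat) (hb : b = mn + (N : Int)) :
    (match (List.foldl (pvAStep d ma) (none, none, mn - 1) (PySem.List.pyRange mn b)).2.1 with
     | some cs => pvBestUpd (List.foldl (pvAStep d ma) (none, none, mn - 1) (PySem.List.pyRange mn b)).1 cs
         (List.foldl (pvAStep d ma) (none, none, mn - 1) (PySem.List.pyRange mn b)).2.2
     | none => (List.foldl (pvAStep d ma) (none, none, mn - 1) (PySem.List.pyRange mn b)).1) =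
      pvBetter (List.foldl pvRunStep (none, none) ((PySem.List.pyRange mn b).filter (pvQ d ma))).1
        (List.foldl pvRunStep (none, none) ((PySem.List.pyRange mn b).filter (pvQ d ma))).2 := by
  subst hb
  exact pvFinal1 d ma mn N

theorem pvFinal2' (d : PySem.Dict Int Int) (ma mn b hi : Int) (N : Nat)
    (hb : b = mn + (N : Int)) (hhi : hi = mn - 1 + (N : Int)) :
    (match (List.foldl (pvAStep d ma) (none, none, mn - 1) (PySem.List.pyRange mn b)).2.1 with
     | some cs => pvBestUpd (List.foldl (pvAStep d ma) (none, none, mn - 1) (PySem.List.pyRange mn b)).1 cs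
         (List.foldl (pvAStep d ma) (none, none, mn - 1) (PySem.List.pyRange mn b)).2.2
     | none => (List.foldl (pvAStep d ma) (none, none, mn - 1) (PySem.List.pyRange mn b)).1) =
      (if (List.foldl pvGapStep (none, mn) ((PySem.List.pyRange mn b).filter (fun c => !pvQ d ma c))).2 ≤ hi then
        pvBetter (List.foldl pvGapStep (none, mn) ((PySem.List.pyRange mn b).filter (fun c => !pvQ d ma c))).1
          (some ((List.foldl pvGapStep (none, mn) ((PySem.List.pyRange mn b).filter (fun c => !pvQ d ma c))).2, hi))
       else (List.foldl pvGapStep (none, mn) ((PySem.List.pyRange mn b).filter (fun c => !pvQ d ma c))).1) := by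
  subst hb hhi
  exact pvFinal2 d ma mn N

-- ===== VERDICT (by name: the statement is the Claim_ definition above) =====
theorem longest_window_spec : Claim_equal_longest_window := by
  intro acs ma _hdom
  unfold Spec_longest_window longest_window longest_window_alt
  by_cases hnil : acs = []
  · simp [hnil]
  · simp only [if_neg hnil]
    have hkeysne : (PySem.Dict.mk acs).keys ≠ [] := by
      cases acs with
      | nil => exact absurd rfl hnil
      | cons p t => simp [PySem.Dict.keys]
    rcases hmin : PySem.List.min? (PySem.Dict.mk acs).keys (fun k => k) with _ | mn
    · rw [PySem.List.min?_eq_none_iff] at hmin; exact absurd hmin hkeysne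
    rcases hmax : PySem.List.max? (PySem.Dict.mk acs).keys (fun k => k) with _ | mx
    · rw [PySem.List.max?_eq_none_iff] at hmax; exact absurd hmax hkeysne
    have hmnmin := PySem.List.min?_isMin hmin
    have hmxmax := PySem.List.max?_isMax hmax
    have hmnmx : mn ≤ mx := hmnmin mx (PySem.List.max?_mem hmax)
    have hN : mx + 1 = mn + (((mx + 1 - mn).toNat : Nat) : Int) := by
      have := Int.toNat_of_nonneg (show (0:Int) ≤ mx + 1 - mn by omega)
      omega
    set d := PySem.Dict.mk acs with hd
    set N : Nat := (mx + 1 - mn).toNat with hNdef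
    have hkeys : d.keys = acs.map Prod.fst := rfl
    have hrangePW := PySem.List.pairwise_lt_pyRange_one mn (mx + 1)
    by_cases hma : ma > 0
    · rw [if_pos hma]
      have hqual : PySem.List.sorted
          ((PySem.List.dedup d.keys).filter (fun c => PySem.Dict.getD d c 0 ≥ ma)) (fun x => x) =
          (PySem.List.pyRange mn (mx + 1)).filter (pvQ d ma) := by
        apply PySem.List.sorted_eq_of_perm_of_pairwise_lt
        · apply (List.perm_ext_iff_of_nodup ?_ ?_).mpr
          · intro c
            simp only [List.mem_filter, PySem.List.mem_pyRange_one, PySem.List.mem_dedup,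
              pvQ, decide_eq_true_eq, ge_iff_le]
            constructor
            · rintro ⟨⟨hlo, hhi⟩, hle⟩
              refine ⟨?_, hle⟩
              by_contra hcn
              rw [hkeys] at hcn
              rw [pvGetD_of_not_mem acs c hcn] at hle
              omega
            · rintro ⟨hc, hle⟩
              exact ⟨⟨hmnmin c hc, by have := hmxmax c hc; omega⟩, hle⟩
          · exact (hrangePW.filter _).nodup
          · exact (PySem.List.nodup_dedup d.keys).filter _
        · exact hrangePW.filter _
      rw [hqual]
      exact pvFinal1' d ma mn (mx + 1) N (by omega)
    · rw [if_neg hma]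
      have hbad : PySem.List.sorted
          ((PySem.List.dedup d.keys).filter (fun c => PySem.Dict.getD d c 0 < ma)) (fun x => x) =
          (PySem.List.pyRange mn (mx + 1)).filter (fun c => !pvQ d ma c) := by
        apply PySem.List.sorted_eq_of_perm_of_pairwise_lt
        · apply (List.perm_ext_iff_of_nodup ?_ ?_).mpr
          · intro c
            simp only [List.mem_filter, PySem.List.mem_pyRange_one, PySem.List.mem_dedup,
              pvQ, Bool.not_eq_eq_eq_not, Bool.not_true, decide_eq_false_iff_not, not_le,
              decide_eq_true_eq]
            constructor
            · rintro ⟨⟨hlo, hhi⟩, hlt⟩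
              refine ⟨?_, hlt⟩
              by_contra hcn
              rw [hkeys] at hcn
              rw [pvGetD_of_not_mem acs c hcn] at hlt
              omega
            · rintro ⟨hc, hlt⟩
              exact ⟨⟨hmnmin c hc, by have := hmxmax c hc; omega⟩, hlt⟩
          · exact (hrangePW.filter _).nodup
          · exact (PySem.List.nodup_dedup d.keys).filter _
        · exact hrangePW.filter _
      rw [hbad]
      exact pvFinal2' d ma mn (mx + 1) mx N (by omega) (by omega)
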